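-- pv_equiv track=rewrite | github.com/javaComSci/Rhythm | Backend/NotesRecognization/partition.py | augment_runs
-- ===== SOURCE A (Python) =====
-- def augment_runs(pr):
-- 	#intitialize staff_lines array
-- 	staff_lines = []
--
-- 	#remove extra rows if entire measure was not in image
-- 	pr = pr[:len(pr) - (len(pr) % 5)]
--
-- 	#group runs by sets of 5 into staff_lines, creating staff lines
-- 	for m in range(0,len(pr),5):
-- 		staff_lines.append(pr[m:m+5])
--
-- 	#for every staff line in staff_lines
-- 	for sl in range(len(staff_lines)):
-- 		#calculate average run distance for a given staff line
-- 		avg_dist = average_run_distance(staff_lines[sl])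
--
-- 		#add row at front and end of list of runs
-- 		staff_lines[sl].insert(0,staff_lines[sl][0] - avg_dist)
-- 		staff_lines[sl].append(staff_lines[sl][len(staff_lines[sl]) - 1] + avg_dist)
--
-- 		#add rows between each previous row of staff line
-- 		list_len = len(staff_lines[sl])
-- 		for d in range(1, list_len):
-- 			# value of new row
-- 			val = staff_lines[sl][2*d - 2] + int(avg_dist/2)
-- 			#insert new row between other two rows
-- 			staff_lines[sl].insert(2*d - 1,val)
--
-- 	return staff_lines
--
-- def average_run_distance(run_list):
-- 	#initialize avgs
-- 	avg = 0
--
-- 	#sum all differences between averages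
-- 	for i in range(len(run_list)-1):
-- 		avg += abs(run_list[i+1] - run_list[i])
--
-- 	#divide by number of differences
-- 	avg = float(avg) / (len(run_list)-1)
--
-- 	return int(avg)
-- ===== SOURCE B (Python) =====
-- def _avg_gap(group):
--     # truncated mean absolute gap; gaps are non-negative so // matches int(float/)
--     return sum(abs(b - a) for a, b in zip(group, group[1:])) // (len(group) - 1)
--
--
-- def _interleave(ext, half):
--     # build the interleaved row left-to-right: e, e+half, next e, ...
--     if len(ext) <= 1:
--         return list(ext)
--     return [ext[0], ext[0] + half] + _interleave(ext[1:], half)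
--
--
-- def _staff(group):
--     avg = _avg_gap(group)
--     ext = [group[0] - avg] + group + [group[-1] + avg]
--     return _interleave(ext, avg // 2)
--
--
-- def augment_runs(pr):
--     usable = pr[:len(pr) - len(pr) % 5]
--     return [_staff(usable[i:i + 5]) for i in range(0, len(usable), 5)]
-- ===== Notes on version B (the rewrite author's own statement) =====
-- stated objective: simpler
-- what changed: Replaces A's in-place insert-at-computed-index (2*d-1) mutation over an indexed list-of-lists with a per-group pure function: a zip-based adjacent-gap average and a recursive left-to-right interleave that builds each 13-row staff line directly, mapped over the groups by a comprehension.
import Mathlib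
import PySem

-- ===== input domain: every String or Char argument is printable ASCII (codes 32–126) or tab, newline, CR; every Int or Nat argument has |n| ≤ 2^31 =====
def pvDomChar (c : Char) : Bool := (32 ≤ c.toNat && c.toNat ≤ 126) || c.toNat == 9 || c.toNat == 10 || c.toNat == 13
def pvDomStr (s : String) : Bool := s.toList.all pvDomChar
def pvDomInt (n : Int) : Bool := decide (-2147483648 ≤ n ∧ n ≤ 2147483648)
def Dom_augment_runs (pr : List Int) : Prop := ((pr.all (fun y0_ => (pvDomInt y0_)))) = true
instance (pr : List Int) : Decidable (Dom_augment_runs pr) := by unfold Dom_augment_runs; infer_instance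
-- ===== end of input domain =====

-- B replaces A's in-place insert-with-computed-index mutation by a recursive chunker and a
-- direct left-to-right interleave (objective: simpler). Return values only; neither mutates its argument.

-- ===== PORT A =====
-- avg = float(avg)/(len-1); int(...) truncates: the sum of absolute gaps is ≥ 0 and (on Dom)
-- small enough that the double division is exact, so truncation = floor division here.
def average_run_distance (run_list : List Int) : Int :=
  let avg : Int := (PySem.List.pyRange 0 ((run_list.length : Int) - 1) 1).foldl
    (fun avg i => avg + |PySem.List.pyGetD run_list (i + 1) 0 - PySem.List.pyGetD run_list i 0|) 0
  PySem.Int.floordiv avg ((run_list.length : Int) - 1)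

def augment_runs (pr : List Int) : List (List Int) :=
  let staff_lines : List (List Int) := []
  -- pr = pr[:len(pr) - (len(pr) % 5)]
  let pr := PySem.List.slice pr none (some ((pr.length : Int) - PySem.Int.mod (pr.length : Int) 5))
  -- for m in range(0, len(pr), 5): staff_lines.append(pr[m:m+5])
  let staff_lines := (PySem.List.pyRange 0 (pr.length : Int) 5).foldl
    (fun acc m => acc ++ [PySem.List.slice pr (some m) (some (m + 5))]) staff_lines
  -- for sl in range(len(staff_lines)): ... mutate staff_lines[sl] in place ...
  -- (indices sl, 0, len-1, 2*d-2 are always in range here, so pyGetD/pySetD are exact)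
  (PySem.List.pyRange 0 (staff_lines.length : Int) 1).foldl
    (fun sls sl =>
      let cur := PySem.List.pyGetD sls sl []
      let avg_dist := average_run_distance cur
      let cur := PySem.List.insert cur 0 (PySem.List.pyGetD cur 0 0 - avg_dist)
      let cur := cur ++ [PySem.List.pyGetD cur ((cur.length : Int) - 1) 0 + avg_dist]
      let list_len := (cur.length : Int)
      -- int(avg_dist/2): avg_dist ≥ 0, so truncation = floor division (exact on Dom)
      let cur := (PySem.List.pyRange 1 list_len 1).foldl
        (fun c d =>
          let val := PySem.List.pyGetD c (2 * d - 2) 0 + PySem.Int.floordiv avg_dist 2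
          PySem.List.insert c (2 * d - 1) val) cur
      PySem.List.pySetD sls sl cur) staff_lines

-- ===== PORT B =====
def pvAvgGap (group : List Int) : Int :=
  PySem.Int.floordiv ((group.zip group.tail).foldl (fun s p => s + |p.2 - p.1|) 0)
    ((group.length : Int) - 1)

def pvInterleave (ext : List Int) (half : Int) : List Int :=
  match ext with
  | [] => []
  | [e] => [e]
  | e :: rest => e :: (e + half) :: pvInterleave rest half

def pvStaff (group : List Int) : List Int :=
  let avg := pvAvgGap group
  let ext := [PySem.List.pyGetD group 0 0 - avg] ++ group ++ [PySem.List.pyGetD group (-1) 0 + avg]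
  pvInterleave ext (PySem.Int.floordiv avg 2)

def augment_runs_alt (pr : List Int) : List (List Int) :=
  let usable := pr.take (pr.length - pr.length % 5)
  (PySem.List.pyRange 0 (usable.length : Int) 5).map
    (fun i => pvStaff (PySem.List.slice usable (some i) (some (i + 5))))

-- ===== PRECONDITION & SPEC =====
def Spec_augment_runs (pr : List Int) (out : List (List Int)) : Prop := out = augment_runs_alt pr
instance (pr : List Int) (out : List (List Int)) : Decidable (Spec_augment_runs pr out) := by unfold Spec_augment_runs; infer_instance

-- ===== CLAIM (what is proved, stated in full; the proofs are below) =====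
def Claim_equal_augment_runs : Prop := ∀ (pr : List Int), Dom_augment_runs pr → Spec_augment_runs pr (augment_runs pr)

-- ===== LEMMAS AND PROOFS =====

-- The per-staff-line transform A applies to the list stored at index sl
def pvLineA (cur0 : List Int) : List Int :=
  let avg_dist := average_run_distance cur0
  let cur := PySem.List.insert cur0 0 (PySem.List.pyGetD cur0 0 0 - avg_dist)
  let cur := cur ++ [PySem.List.pyGetD cur ((cur.length : Int) - 1) 0 + avg_dist]
  let list_len := (cur.length : Int)
  (PySem.List.pyRange 1 list_len 1).foldl
    (fun c d =>
      let val := PySem.List.pyGetD c (2 * d - 2) 0 + PySem.Int.floordiv avg_dist 2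
      PySem.List.insert c (2 * d - 1) val) cur

-- On a 5-element group, A's insert-based construction equals B's interleave.
set_option maxHeartbeats 2000000 in
theorem pvLineA_eq_staff (g : List Int) (hg : g.length = 5) : pvLineA g = pvStaff g := by
  match g, hg with
  | [a, b, c, d, e], _ =>
    have hr4 : PySem.List.pyRange 0 4 = [0,1,2,3] := by decide
    have hr7 : PySem.List.pyRange 1 7 = [1,2,3,4,5,6] := by decide
    have hneg : PySem.List.pyGetD [a,b,c,d,e] (-1) 0 = e := by
      simp [PySem.List.pyGetD, PySem.List.pyGet?, PySem.List.pyIdx?]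
    norm_num [pvLineA, pvStaff, pvInterleave, average_run_distance, pvAvgGap, hr4, hr7, hneg,
      PySem.List.pyGetD_ofNat', PySem.List.insert_ofNat, PySem.List.insert_zero]

-- A's in-place update loop over indices is a map.
theorem pvFoldSet (f : List Int → List Int) :
    ∀ (todo done : List (List Int)),
      (PySem.List.pyRange (done.length : Int) ((done.length + todo.length : Nat) : Int) 1).foldl
          (fun sls sl => PySem.List.pySetD sls sl (f (PySem.List.pyGetD sls sl []))) (done ++ todo)
        = done ++ todo.map f := by
  intro todo
  induction todo with
  | nil => intro done; simp [PySem.List.pyRange_one_eq_nil]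
  | cons x rest ih =>
    intro done
    rw [PySem.List.pyRange_one_cons (by push_cast [List.length_cons]; omega)]
    simp only [List.foldl_cons]
    have hget : PySem.List.pyGetD (done ++ x :: rest) (done.length : Int) [] = x := by
      rw [PySem.List.pyGetD_natCast]
      simp [List.getD]
    have hset : PySem.List.pySetD (done ++ x :: rest) (done.length : Int) (f x)
        = (done ++ [f x]) ++ rest := by
      rw [PySem.List.pySetD_natCast]
      rw [List.set_append_right _ _ (le_refl _)]
      simp
    rw [hget, hset]
    have := ih (done ++ [f x])
    have hlen : ((done ++ [f x]).length : Int) = (done.length : Int) + 1 := by simp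
    have hlen2 : (((done ++ [f x]).length + rest.length : Nat) : Int)
        = ((done.length + (x :: rest).length : Nat) : Int) := by simp; omega
    rw [hlen, hlen2] at this
    rw [this]
    simp

-- A's grouping fold in the same closed form.
theorem pvGroupA_eq_map (l : List Int) :
    (PySem.List.pyRange 0 (l.length : Int) 5).foldl
        (fun acc m => acc ++ [PySem.List.slice l (some m) (some (m + 5))]) []
      = (List.range ((l.length + 4) / 5)).map (fun k => (l.drop (5 * k)).take 5) := by
  rw [PySem.List.foldl_append_singleton_eq_map, List.nil_append]
  rw [PySem.List.pyRange_of_pos 0 (l.length : Int) (by norm_num)]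
  rw [List.map_map]
  by_cases hnil : l.length = 0
  · simp [hnil]
  · rw [if_pos (by exact_mod_cast Nat.pos_of_ne_zero hnil)]
    have hc : (((l.length : Int) - 0 + 5 - 1) / 5).toNat = (l.length + 4) / 5 := by
      simp only [sub_zero]
      omega
    rw [hc]
    apply List.map_congr_left
    intro k _
    simp only [Function.comp]
    have h0 : (0 : Int) + 5 * (k : Int) = ((5 * k : Nat) : Int) := by push_cast; ring
    have h5 : ((5 * k : Nat) : Int) + 5 = ((5 * k + 5 : Nat) : Int) := by push_cast; ring
    rw [h0, h5, PySem.List.slice_natCast]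
    congr 1
    omega

-- the same closed form for a bare map over the range (B's comprehension)
theorem pvGroupMap_eq_map (l : List Int) :
    (PySem.List.pyRange 0 (l.length : Int) 5).map
        (fun m => PySem.List.slice l (some m) (some (m + 5)))
      = (List.range ((l.length + 4) / 5)).map (fun k => (l.drop (5 * k)).take 5) := by
  have h := pvGroupA_eq_map l
  rw [PySem.List.foldl_append_singleton_eq_map, List.nil_append] at h
  exact h

-- length of each chunk of a multiple-of-5 list
theorem pvChunkLen (l : List Int) (hl : l.length % 5 = 0) (k : Nat) (hk : k < l.length / 5) :
    ((l.drop (5 * k)).take 5).length = 5 := by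
  simp [List.length_take, List.length_drop]
  omega

-- ===== VERDICT (by name: the statement is the Claim_ definition above) =====
theorem augment_runs_spec : Claim_equal_augment_runs := by
  intro pr _
  unfold Spec_augment_runs augment_runs augment_runs_alt
  -- the truncated prefix
  have hmod : PySem.Int.mod (pr.length : Int) 5 = ((pr.length % 5 : Nat) : Int) := by
    simp [PySem.Int.mod, Int.fmod_eq_emod]
  have htrunc : PySem.List.slice pr none
      (some ((pr.length : Int) - PySem.Int.mod (pr.length : Int) 5))
      = pr.take (pr.length - pr.length % 5) := by
    rw [hmod]
    rw [PySem.List.slice_to pr (by push_cast; omega)]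
    congr 1
    omega
  simp only [htrunc]
  set usable := pr.take (pr.length - pr.length % 5) with husable
  have hulen : usable.length = pr.length - pr.length % 5 := by
    simp [husable]
  have humod : usable.length % 5 = 0 := by omega
  -- grouping
  rw [pvGroupA_eq_map usable]
  have hceil : (usable.length + 4) / 5 = usable.length / 5 := by omega
  rw [hceil]
  -- second loop = map pvLineA
  have hmap := pvFoldSet pvLineA
      ((List.range (usable.length / 5)).map (fun k => (usable.drop (5 * k)).take 5)) []
  simp only [List.nil_append, List.length_nil, Nat.cast_zero, Nat.zero_add] at hmap
  have hfold :
      (PySem.List.pyRange 0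
          ((((List.range (usable.length / 5)).map (fun k => (usable.drop (5 * k)).take 5)).length : Nat) : Int) 1).foldl
        (fun sls sl =>
          let cur := PySem.List.pyGetD sls sl []
          let avg_dist := average_run_distance cur
          let cur := PySem.List.insert cur 0 (PySem.List.pyGetD cur 0 0 - avg_dist)
          let cur := cur ++ [PySem.List.pyGetD cur ((cur.length : Int) - 1) 0 + avg_dist]
          let list_len := (cur.length : Int)
          let cur := (PySem.List.pyRange 1 list_len 1).foldl
            (fun c d =>
              let val := PySem.List.pyGetD c (2 * d - 2) 0 + PySem.Int.floordiv avg_dist 2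
              PySem.List.insert c (2 * d - 1) val) cur
          PySem.List.pySetD sls sl cur)
        ((List.range (usable.length / 5)).map (fun k => (usable.drop (5 * k)).take 5))
      = ((List.range (usable.length / 5)).map (fun k => (usable.drop (5 * k)).take 5)).map pvLineA := by
    exact hmap
  rw [hfold]
  have hB : (PySem.List.pyRange 0 (usable.length : Int) 5).map
      (fun i => pvStaff (PySem.List.slice usable (some i) (some (i + 5))))
      = ((List.range (usable.length / 5)).map (fun k => (usable.drop (5 * k)).take 5)).map pvStaff := by
    have := pvGroupMap_eq_map usable
    rw [hceil] at this
    rw [← this, List.map_map]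
    simp [Function.comp]
  rw [hB, List.map_map, List.map_map]
  apply List.map_congr_left
  intro k hk
  simp only [Function.comp]
  exact pvLineA_eq_staff _ (pvChunkLen usable humod k (List.mem_range.mp hk))
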